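-- pv_equiv track=rewrite | github.com/AI-Force/aiforce | aiforce/tools/check_double_images.py | check_double_entries
-- ===== SOURCE A (Python) =====
-- def check_double_entries(entries):
--     """
--     Process a list of tuples of filenames and corresponding hash for double hashes.
--     `entries`: the list of entries with their hashes
--     returns: a dictionary containing double entries by hash
--     """
--
--     hashes = dict()
--     for entry in entries:
--         h = entry[1]
--         if h not in hashes:
--             hashes[h] = []
--         hashes[h].append(entry)
--
--     double_hashes = dict()
--     for (key, entrylist) in hashes.items():
--         if len(entrylist) > 1:
--             double_hashes[key] = entrylist
--     return double_hashes
-- ===== SOURCE B (Python) =====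
-- def check_double_entries(entries):
--     """
--     Process a list of tuples of filenames and corresponding hash for double hashes.
--     Count-then-collect: one counting pass over the hashes, then one pass that
--     keeps only entries whose hash occurs more than once (no full grouping dict).
--     """
--     counts = {}
--     for entry in entries:
--         h = entry[1]
--         counts[h] = counts.get(h, 0) + 1
--     double_hashes = {}
--     for entry in entries:
--         h = entry[1]
--         if counts[h] > 1:
--             double_hashes.setdefault(h, []).append(entry)
--     return double_hashes
-- ===== Notes on version B (the rewrite author's own statement) =====
-- stated objective: alternative
-- what changed: B never builds the full hash->entries grouping dict: it first counts hash occurrences in one pass, then collects only the entries whose hash count exceeds 1 in a second pass, preserving first-appearance key order.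
import Mathlib
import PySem

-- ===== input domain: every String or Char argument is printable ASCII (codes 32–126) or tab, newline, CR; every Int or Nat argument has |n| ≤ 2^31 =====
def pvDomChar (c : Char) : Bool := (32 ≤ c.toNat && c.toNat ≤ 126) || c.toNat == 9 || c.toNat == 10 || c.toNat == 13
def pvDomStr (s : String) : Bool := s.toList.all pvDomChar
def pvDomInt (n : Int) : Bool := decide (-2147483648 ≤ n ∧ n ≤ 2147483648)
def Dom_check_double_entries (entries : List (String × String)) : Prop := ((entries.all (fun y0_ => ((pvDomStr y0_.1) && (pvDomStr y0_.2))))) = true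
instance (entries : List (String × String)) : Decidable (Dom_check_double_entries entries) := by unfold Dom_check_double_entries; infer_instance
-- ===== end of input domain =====

-- B replaces A's full hash->entries grouping dict by a count pass plus a single
-- filtered collection pass (alternative decomposition, same asymptotic cost).


-- ===== PORT A =====
-- literal port: first fold builds hashes (if h not in hashes: hashes[h] = []; append),
-- second fold keeps the groups with more than one entry.
def check_double_entries (entries : List (String × String)) : List (String × List (String × String)) :=
  let hashes := entries.foldl (fun d entry =>
    let h := entry.2
    let d := if d.contains h then d else d.insert h ([] : List (String × String))
    d.modify h [] (fun l => l ++ [entry])) PySem.Dict.empty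
  let double_hashes := hashes.items.foldl (fun dd p =>
    if p.2.length > 1 then dd.insert p.1 p.2 else dd) PySem.Dict.empty
  double_hashes.items

-- ===== PORT B =====
-- literal port of Source B: counting pass, then one pass collecting entries whose hash
-- count exceeds 1.  counts[h] in the second loop is ported as getD (the key is
-- always present there, so Python never raises).
def check_double_entries_alt (entries : List (String × String)) : List (String × List (String × String)) :=
  let counts := entries.foldl (fun d entry =>
    d.insert entry.2 (d.getD entry.2 0 + 1)) (PySem.Dict.empty : PySem.Dict String Int)
  let double_hashes := entries.foldl (fun d entry =>
    let h := entry.2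
    if counts.getD h 0 > 1 then
      (d.setdefault h ([] : List (String × String))).modify h [] (fun l => l ++ [entry])
    else d) PySem.Dict.empty
  double_hashes.items

-- ===== PRECONDITION & SPEC =====
def Spec_check_double_entries (entries : List (String × String)) (out : List (String × List (String × String))) : Prop := out = check_double_entries_alt entries
instance (entries : List (String × String)) (out : List (String × List (String × String))) : Decidable (Spec_check_double_entries entries out) := by unfold Spec_check_double_entries; infer_instance

-- ===== CLAIM (what is proved, stated in full; the proofs are below) =====
def Claim_equal_check_double_entries : Prop := ∀ (entries : List (String × String)), Dom_check_double_entries entries → Spec_check_double_entries entries (check_double_entries entries)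

-- ===== LEMMAS AND PROOFS =====

-- the group of entries carrying hash h, in input order
def pvGrp (entries : List (String × String)) (h : String) : List (String × String) :=
  entries.filter (fun e => e.2 == h)

-- canonical value: hashes in first-appearance order, kept iff their group has > 1 entry
def pvCanon (entries : List (String × String)) : List (String × List (String × String)) :=
  ((PySem.Set.ofList (entries.map (fun e => e.2))).filter
      (fun h => decide (1 < (pvGrp entries h).length))).map
    (fun h => (h, pvGrp entries h))

-- A's guarded insert-then-append step is a plain modify-with-default
lemma stepA_eq (d : PySem.Dict String (List (String × String))) (e : String × String) :
    ((if d.contains e.2 then d else d.insert e.2 []).modify e.2 [] (fun l => l ++ [e]))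
      = d.modify e.2 [] (fun l => l ++ [e]) := by
  by_cases hc : d.contains e.2
  · simp [hc]
  · have hc' : d.contains e.2 = false := by simpa using hc
    simp only [hc', Bool.false_eq_true, if_false]
    simp [PySem.Dict.modify, PySem.Dict.getD_insert_self, PySem.Dict.insert_insert_self,
      PySem.Dict.getD_of_not_contains d _ hc']

-- B's setdefault-then-append step is the same modify-with-default
lemma stepB_eq (d : PySem.Dict String (List (String × String))) (e : String × String) :
    ((d.setdefault e.2 []).modify e.2 [] (fun l => l ++ [e]))
      = d.modify e.2 [] (fun l => l ++ [e]) := by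
  by_cases hc : d.contains e.2
  · rw [PySem.Dict.setdefault_of_contains d _ hc]
  · have hc' : d.contains e.2 = false := by simpa using hc
    rw [PySem.Dict.setdefault_of_not_contains d _ hc']
    simp [PySem.Dict.modify, PySem.Dict.getD_insert_self, PySem.Dict.insert_insert_self,
      PySem.Dict.getD_of_not_contains d _ hc']

-- characterization of the grouping fold
lemma group_fold_items (l : List (String × String)) :
    (l.foldl (fun d e => d.modify e.2 [] (fun acc => acc ++ [e])) PySem.Dict.empty).items
      = (PySem.Set.ofList (l.map (fun e => e.2))).map (fun h => (h, pvGrp l h)) := by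
  have hkeys : (l.foldl (fun d e => d.modify e.2 [] (fun acc => acc ++ [e]))
      PySem.Dict.empty).keys = PySem.Set.ofList (l.map (fun e => e.2)) := by
    have := PySem.Dict.keys_foldl_modify_key l (fun e => e.2) ([] : List (String × String))
      (fun _ e acc => acc ++ [e]) PySem.Dict.empty
    simpa [PySem.Dict.keys_empty, PySem.Set.update_nil_left] using this
  have hgetD : ∀ h, (l.foldl (fun d e => d.modify e.2 [] (fun acc => acc ++ [e]))
      PySem.Dict.empty).getD h [] = pvGrp l h := by
    intro h
    have hmap : l.foldl (fun d e => d.modify e.2 [] (fun acc => acc ++ [e])) PySem.Dict.empty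
        = (l.map (fun e => (e.2, e))).foldl
            (fun d p => d.modify p.1 [] (fun acc => acc ++ [p.2])) PySem.Dict.empty := by
      rw [List.foldl_map]
    rw [hmap, PySem.Dict.getD_foldl_modify_append]
    simp [PySem.Dict.getD_empty, List.filter_map, List.map_map, pvGrp, Function.comp_def]
  rw [PySem.Dict.items_eq_map_keys _ (by rw [hkeys]; exact PySem.Set.nodup_ofList _) [],
    hkeys]
  exact List.map_congr_left (fun h _ => by rw [hgetD])

-- conditional-insert fold over fresh distinct keys appends the filtered pairs
lemma foldl_cond_insert {E : Type} (cond : String × E → Bool) :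
    ∀ (L : List (String × E)) (d : PySem.Dict String E),
      (d.keys ++ L.map (fun p => p.1)).Nodup →
      (L.foldl (fun dd p => if cond p then dd.insert p.1 p.2 else dd) d).items
        = d.items ++ L.filter cond := by
  intro L
  induction L with
  | nil => intro d _; simp
  | cons p L ih =>
    intro d hnd
    have hfresh : d.contains p.1 = false := by
      rw [List.nodup_append] at hnd
      by_contra hc
      have : p.1 ∈ d.keys := by
        rw [← PySem.Dict.contains_iff_mem_keys]
        simpa using hc
      exact hnd.2.2 p.1 this p.1 (by simp) rfl
    by_cases hp : cond p = true
    · simp only [List.foldl_cons, hp, if_true]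
      rw [ih (d.insert p.1 p.2)
          (by rw [PySem.Dict.keys_insert_of_not_contains d _ hfresh]
              simpa [List.append_assoc] using hnd),
        PySem.Dict.items_insert_of_not_contains d _ hfresh]
      simp [hp]
    · have hp' : cond p = false := by simpa using hp
      simp only [List.foldl_cons, hp', Bool.false_eq_true, if_false]
      rw [ih d (by
        have : (d.keys ++ List.map (fun p => p.1) L).Sublist
            (d.keys ++ p.1 :: List.map (fun p => p.1) L) :=
          List.Sublist.append_left (List.sublist_cons_self _ _) _
        exact this.nodup hnd)]
      simp [hp']

-- the conditional fold is the fold of the filtered list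
lemma foldl_if_filter {α β : Type} (p : β → Prop) [DecidablePred p] (f : α → β → α) :
    ∀ (l : List β) (init : α),
      l.foldl (fun a b => if p b then f a b else a) init
        = (l.filter (fun b => decide (p b))).foldl f init := by
  intro l
  induction l with
  | nil => intro init; rfl
  | cons x xs ih =>
    intro init
    by_cases hp : p x <;> simp [hp, ih]

-- dedup commutes with filter
lemma ofList_filter {α : Type} [BEq α] [LawfulBEq α] (p : α → Bool) :
    ∀ (l : List α), PySem.Set.ofList (l.filter p) = (PySem.Set.ofList l).filter p := by
  intro l
  induction l with
  | nil => rfl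
  | cons x xs ih =>
    rw [PySem.Set.ofList_cons]
    have hdis : ∀ (s : PySem.Set α), s.discard x = s.filter (fun y => y != x) := fun _ => rfl
    by_cases hp : p x = true
    · rw [List.filter_cons_of_pos hp, PySem.Set.ofList_cons, ih, List.filter_cons_of_pos hp,
        hdis, hdis, List.filter_filter, List.filter_filter]
      exact congrArg _ (List.filter_congr (fun y _ => Bool.and_comm _ _))
    · have hp' : p x = false := by simpa using hp
      rw [List.filter_cons_of_neg (by simp [hp']), ih, hdis,
        List.filter_cons_of_neg (by simp [hp']), List.filter_filter]
      refine (List.filter_congr (fun y _ => ?_)).symm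
      by_cases hy : y = x
      · subst hy; simp [hp']
      · simp [bne_iff_ne, hy]

-- the length of the group of h equals the multiplicity of h among the hashes
lemma grp_length (entries : List (String × String)) (h : String) :
    (pvGrp entries h).length = (entries.map (fun e => e.2)).count h := by
  rw [List.count_eq_countP, List.countP_map, List.countP_eq_length_filter]
  rfl

lemma A_eq_canon (entries : List (String × String)) :
    check_double_entries entries = pvCanon entries := by
  show ((entries.foldl (fun d entry =>
      (if d.contains entry.2 then d else d.insert entry.2 []).modify entry.2 []
        (fun l => l ++ [entry])) PySem.Dict.empty).items.foldl
      (fun dd p => if p.2.length > 1 then dd.insert p.1 p.2 else dd)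
      PySem.Dict.empty).items = pvCanon entries
  simp only [stepA_eq]
  rw [group_fold_items]
  have hif : ∀ (dd : PySem.Dict String (List (String × String)))
      (p : String × List (String × String)),
      (if p.2.length > 1 then dd.insert p.1 p.2 else dd)
        = (if decide (1 < p.2.length) = true then dd.insert p.1 p.2 else dd) := by
    intro dd p; by_cases hp : 1 < p.2.length <;> simp [hp]
  simp only [hif]
  rw [foldl_cond_insert (fun p : String × List (String × String) => decide (1 < p.2.length)) _
      PySem.Dict.empty
      (by simp [PySem.Dict.keys_empty, List.map_map, Function.comp_def, PySem.Set.nodup_ofList (entries.map (fun e => e.2))])]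
  show [] ++ _ = _
  rw [List.nil_append, List.filter_map]
  rfl

lemma B_eq_canon (entries : List (String × String)) :
    check_double_entries_alt entries = pvCanon entries := by
  have hcount : ∀ h, (entries.foldl (fun d e => d.insert e.2 (d.getD e.2 0 + 1))
      (PySem.Dict.empty : PySem.Dict String Int)).getD h 0
        = ((entries.map (fun e => e.2)).count h : Int) := by
    intro h
    have hmap : entries.foldl (fun d e => d.insert e.2 (d.getD e.2 0 + 1))
        (PySem.Dict.empty : PySem.Dict String Int)
        = (entries.map (fun e => e.2)).foldl (fun d x => d.insert x (d.getD x 0 + 1))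
            PySem.Dict.empty := by
      rw [List.foldl_map]
    rw [hmap, PySem.Dict.getD_foldl_insert_add_one]
    simp [PySem.Dict.getD_empty]
  show (entries.foldl (fun d entry =>
      if (entries.foldl (fun d e => d.insert e.2 (d.getD e.2 0 + 1))
          (PySem.Dict.empty : PySem.Dict String Int)).getD entry.2 0 > 1 then
        (d.setdefault entry.2 []).modify entry.2 [] (fun l => l ++ [entry])
      else d) PySem.Dict.empty).items = pvCanon entries
  simp only [stepB_eq, hcount]
  rw [foldl_if_filter (fun e : String × String =>
      (1 : Int) < ((entries.map (fun e => e.2)).count e.2 : Int)) _ entries PySem.Dict.empty]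
  rw [group_fold_items]
  have hQ : (fun e : String × String =>
        decide ((1 : Int) < ((entries.map (fun e => e.2)).count e.2 : Int)))
      = (fun h : String =>
        decide ((1 : Int) < ((entries.map (fun e => e.2)).count h : Int))) ∘ (fun e => e.2) :=
    rfl
  rw [hQ, ← List.filter_map, ofList_filter]
  have hpred : ∀ h : String,
      decide ((1 : Int) < ((entries.map (fun e => e.2)).count h : Int))
        = decide (1 < (pvGrp entries h).length) := by
    intro h
    rw [grp_length]
    exact decide_eq_decide.mpr (by exact_mod_cast Iff.rfl)
  rw [show (fun h : String =>
      decide ((1 : Int) < ((entries.map (fun e => e.2)).count h : Int)))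
      = (fun h => decide (1 < (pvGrp entries h).length)) from funext hpred]
  refine List.map_congr_left (fun h hmem => ?_)
  have hPh : decide (1 < (pvGrp entries h).length) = true := by
    rw [List.mem_filter] at hmem
    exact hmem.2
  have hgrp : pvGrp (entries.filter ((fun h : String =>
        decide (1 < (pvGrp entries h).length)) ∘ (fun e => e.2))) h
      = pvGrp entries h := by
    show List.filter _ (List.filter _ entries) = _
    rw [List.filter_filter]
    refine List.filter_congr (fun e _ => ?_)
    by_cases he : e.2 = h
    · simp [he, hPh]
    · simp [he]
  rw [hgrp]

-- ===== VERDICT (by name: the statement is the Claim_ definition above) =====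
theorem check_double_entries_spec : Claim_equal_check_double_entries := by
  intro entries _
  show check_double_entries entries = check_double_entries_alt entries
  rw [A_eq_canon, B_eq_canon]
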